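-- pv_equiv track=rewrite | github.com/dogcomplex/resonance | multi_fidelity_v2.py | coarsen_token
-- ===== SOURCE A (Python) =====
-- def coarsen_token(token: str) -> str:
--     """Convert a fine token to its coarse version."""
--     # Pattern: has_TYPE_MATERIAL → has_TYPE_material
--     # e.g., has_raw_iron → has_raw_material
--     # e.g., +has_cooked_copper → +has_cooked_material
--
--     prefixes = ['has_raw_', 'has_cooked_', '+has_raw_', '-has_raw_',
--                 '+has_cooked_', '-has_cooked_']
--
--     for prefix in prefixes:
--         if token.startswith(prefix):
--             # Keep the prefix, replace specific with "material"
--             suffix = token[len(prefix):]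
--             if suffix not in ['material']:  # Don't double-coarsen
--                 return prefix + "material"
--
--     # Position coarsening: pos_X → region_X//4
--     if token.startswith('pos_') or token.startswith('+pos_') or token.startswith('-pos_'):
--         # This is a simple example - real coarsening would be domain-specific
--         pass
--
--     return token  # No coarsening available
-- ===== SOURCE B (Python) =====
-- def coarsen_token(token: str) -> str:
--     """Convert a fine token to its coarse version."""
--     # Split off an optional leading sign, then coarsen the base by stem.
--     sign, base = "", token
--     if token[:1] in ("+", "-"):
--         sign, base = token[0], token[1:]
--     if base.startswith("has_raw_"):
--         stem, rest = "has_raw_", base[8:]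
--     elif base.startswith("has_cooked_"):
--         stem, rest = "has_cooked_", base[11:]
--     else:
--         return token
--     return token if rest == "material" else sign + stem + "material"
-- ===== Notes on version B (the rewrite author's own statement) =====
-- stated objective: simpler
-- what changed: Replaces the 6-element prefix enumeration loop by a sign/base decomposition: an optional leading '+'/'-' is split off once, then only the two stems 'has_raw_'/'has_cooked_' are checked on the base.
import Mathlib
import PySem

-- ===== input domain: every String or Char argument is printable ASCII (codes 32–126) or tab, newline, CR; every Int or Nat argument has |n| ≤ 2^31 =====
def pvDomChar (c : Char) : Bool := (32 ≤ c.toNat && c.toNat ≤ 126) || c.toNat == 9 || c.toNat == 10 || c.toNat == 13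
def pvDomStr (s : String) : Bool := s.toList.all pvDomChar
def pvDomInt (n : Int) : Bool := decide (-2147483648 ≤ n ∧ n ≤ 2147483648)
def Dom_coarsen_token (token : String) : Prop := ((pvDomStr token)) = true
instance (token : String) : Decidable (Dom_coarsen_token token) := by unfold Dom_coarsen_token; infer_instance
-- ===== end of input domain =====

-- B replaces A's six-prefix enumeration loop by a single sign/base decomposition (objective: simpler).

-- ===== PORT A =====
def pvMaterial : List Char := "material".toList

-- A's for-loop over `prefixes`: the first matching prefix whose suffix is not 'material' wins
def pvLoopA (ts : List Char) : List (List Char) → Option (List Char)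
  | [] => none
  | p :: ps =>
    if PySem.Chars.startswith ts p then
      let suffix := PySem.List.slice ts (some (p.length : Int)) none
      if suffix ∉ [pvMaterial] then some (p ++ pvMaterial)
      else pvLoopA ts ps
    else pvLoopA ts ps

def pvPrefixesA : List (List Char) :=
  ["has_raw_".toList, "has_cooked_".toList, "+has_raw_".toList, "-has_raw_".toList,
   "+has_cooked_".toList, "-has_cooked_".toList]

def coarsen_token (token : String) : String :=
  match pvLoopA token.toList pvPrefixesA with
  | some r => String.ofList r
  -- A's pos_ branch only `pass`es, after which A returns token; so `none` yields token
  | none => token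

-- ===== PORT B =====
def coarsen_token_alt (token : String) : String :=
  let ts := token.toList
  -- sign, base = "", token; if token[:1] in ("+", "-"): sign, base = token[0], token[1:]
  let sb : List Char × List Char :=
    if PySem.List.slice ts none (some 1) ∈ [['+'], ['-']] then (ts.take 1, ts.drop 1)
    else ([], ts)
  if PySem.Chars.startswith sb.2 "has_raw_".toList then
    if PySem.List.slice sb.2 (some 8) none = pvMaterial then token
    else String.ofList (sb.1 ++ "has_raw_".toList ++ pvMaterial)
  else if PySem.Chars.startswith sb.2 "has_cooked_".toList then
    if PySem.List.slice sb.2 (some 11) none = pvMaterial then token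
    else String.ofList (sb.1 ++ "has_cooked_".toList ++ pvMaterial)
  else token

-- ===== PRECONDITION & SPEC =====
def Spec_coarsen_token (token : String) (out : String) : Prop := out = coarsen_token_alt token
instance (token : String) (out : String) : Decidable (Spec_coarsen_token token out) := by unfold Spec_coarsen_token; infer_instance

-- ===== CLAIM (what is proved, stated in full; the proofs are below) =====
def Claim_equal_coarsen_token : Prop := ∀ (token : String), Dom_coarsen_token token → Spec_coarsen_token token (coarsen_token token)

-- ===== LEMMAS AND PROOFS =====

-- a string starting with 'as_raw_' cannot also start with 'as_cooked_' (tails after a shared head)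
theorem raw_not_cooked' (l : List Char)
    (h : (['a','s','_','r','a','w','_'] : List Char) <+: l) :
    ¬ ((['a','s','_','c','o','o','k','e','d','_'] : List Char) <+: l) := by
  obtain ⟨t, rfl⟩ := h
  simp [List.cons_prefix_cons]

-- a string starting with 'has_raw_' cannot also start with 'has_cooked_'
theorem raw_not_cooked (l : List Char)
    (h : (['h','a','s','_','r','a','w','_'] : List Char) <+: l) :
    ¬ ((['h','a','s','_','c','o','o','k','e','d','_'] : List Char) <+: l) := by
  obtain ⟨t, rfl⟩ := h
  simp [List.cons_prefix_cons]

theorem coarsen_token_eq_alt (token : String) : coarsen_token token = coarsen_token_alt token := by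
  unfold coarsen_token coarsen_token_alt
  rcases h : token.toList with _ | ⟨c, rest⟩
  · simp [pvLoopA, pvPrefixesA, PySem.Chars.startswith, List.isPrefixOf, PySem.List.slice]
  · by_cases hp : c = '+'
    · subst hp
      simp only [pvLoopA, pvPrefixesA, pvMaterial, PySem.Chars.startswith]
      simp [List.isPrefixOf, PySem.List.slice_from, PySem.List.slice_to]
      split_ifs with h1 h2 h3 h4 <;>
        first
          | rfl
          | (exact absurd h3 (raw_not_cooked rest h1))
    · by_cases hm : c = '-'
      · subst hm
        simp only [pvLoopA, pvPrefixesA, pvMaterial, PySem.Chars.startswith]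
        simp [List.isPrefixOf, PySem.List.slice_from, PySem.List.slice_to]
        split_ifs with h1 h2 h3 h4 <;>
          first
            | rfl
            | (exact absurd h3 (raw_not_cooked rest h1))
      · simp only [pvLoopA, pvPrefixesA, pvMaterial, PySem.Chars.startswith]
        simp [List.isPrefixOf, PySem.List.slice_from, PySem.List.slice_to,
              hp, hm, Ne.symm hp, Ne.symm hm]
        split_ifs with h1 h2 h3 h4 <;>
          first
            | rfl
            | (exact absurd h3.2 (raw_not_cooked' rest h1.2))

-- ===== VERDICT (by name: the statement is the Claim_ definition above) =====
theorem coarsen_token_spec : Claim_equal_coarsen_token := by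
  intro token _
  unfold Spec_coarsen_token
  exact coarsen_token_eq_alt token
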